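-- pv_equiv track=rewrite | github.com/pinargoktepe/PatRec | Exercise_4/main.py | getFiles_byUser
-- ===== SOURCE A (Python) =====
-- def getFiles_byUser(user_id, files):
--     user_files = []
--     signature_ids = []
--     for f in files:
--         ind_slash = f.rfind('/')
--         ind_dash = f.find('-') #This is for getting the user name
--         if f[ind_slash+1:ind_dash] == user_id:
--             user_files.append(f)
--             ind_dash = f.rfind('-') #this is for signature id
--             ind_dot = f.rfind('.')
--             signature_ids.append(f[ind_dash+1:ind_dot])
--
--     return user_files, signature_ids
-- ===== SOURCE B (Python) =====
-- def getFiles_byUser(user_id, files):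
--     # Group all files by their extracted user key in one indexing pass,
--     # then answer the query with a single dict lookup.
--     by_user = {}
--     for f in files:
--         by_user.setdefault(f[f.rfind('/')+1:f.find('-')], []).append(f)
--     user_files = by_user.get(user_id, [])
--     signature_ids = [f[f.rfind('-')+1:f.rfind('.')] for f in user_files]
--     return user_files, signature_ids
-- ===== Notes on version B (the rewrite author's own statement) =====
-- stated objective: alternative
-- what changed: Instead of testing each file against user_id in the loop, B builds a dict index grouping every file under its extracted user key, answers the query with one dict lookup, and derives signature ids from that group alone.
import Mathlib
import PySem

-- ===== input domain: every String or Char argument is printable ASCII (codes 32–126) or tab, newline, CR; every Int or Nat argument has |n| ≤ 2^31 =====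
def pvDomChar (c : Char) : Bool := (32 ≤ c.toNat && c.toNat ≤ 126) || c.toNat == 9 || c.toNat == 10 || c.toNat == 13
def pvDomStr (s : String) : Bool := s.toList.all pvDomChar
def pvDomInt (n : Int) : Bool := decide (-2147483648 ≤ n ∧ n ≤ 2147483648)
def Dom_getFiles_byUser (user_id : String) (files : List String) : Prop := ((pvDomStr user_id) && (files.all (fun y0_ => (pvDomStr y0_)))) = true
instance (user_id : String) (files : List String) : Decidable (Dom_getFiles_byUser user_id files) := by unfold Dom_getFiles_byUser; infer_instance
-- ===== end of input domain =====

-- B replaces A's per-file equality test by a dict index grouping every file under its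
-- extracted user key, answered with one lookup (alternative decomposition, same results).
-- ===== PORT A =====
def getFiles_byUser (user_id : String) (files : List String) : List String × List String :=
  files.foldl (fun acc f =>
    let ind_slash := PySem.Str.rfind f "/"
    let ind_dash := PySem.Str.find f "-"
    if PySem.Str.slice f (some (ind_slash + 1)) (some ind_dash) = user_id then
      let ind_dash2 := PySem.Str.rfind f "-"
      let ind_dot := PySem.Str.rfind f "."
      (acc.1 ++ [f], acc.2 ++ [PySem.Str.slice f (some (ind_dash2 + 1)) (some ind_dot)])
    else acc) ([], [])

-- ===== PORT B =====
def pvUserKey (f : String) : String :=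
  PySem.Str.slice f (some (PySem.Str.rfind f "/" + 1)) (some (PySem.Str.find f "-"))

def pvSigId (f : String) : String :=
  PySem.Str.slice f (some (PySem.Str.rfind f "-" + 1)) (some (PySem.Str.rfind f "."))

def getFiles_byUser_alt (user_id : String) (files : List String) : List String × List String :=
  -- by_user.setdefault(key, []).append(f)  ≡  modify key [] (· ++ [f])
  let by_user : PySem.Dict String (List String) :=
    files.foldl (fun d f => d.modify (pvUserKey f) [] (· ++ [f])) PySem.Dict.empty
  let user_files := by_user.getD user_id []
  (user_files, user_files.map pvSigId)

-- ===== PRECONDITION & SPEC =====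
def Spec_getFiles_byUser (user_id : String) (files : List String) (out : List String × List String) : Prop := out = getFiles_byUser_alt user_id files
instance (user_id : String) (files : List String) (out : List String × List String) : Decidable (Spec_getFiles_byUser user_id files out) := by unfold Spec_getFiles_byUser; infer_instance

-- ===== CLAIM =====
def Claim_equal_getFiles_byUser : Prop := ∀ (user_id : String) (files : List String), Dom_getFiles_byUser user_id files → Spec_getFiles_byUser user_id files (getFiles_byUser user_id files)

-- ===== LEMMAS AND PROOFS =====
theorem getFiles_foldl_eq (user_id : String) (files : List String)
    (ufs sids : List String) :
    files.foldl (fun acc f =>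
      let ind_slash := PySem.Str.rfind f "/"
      let ind_dash := PySem.Str.find f "-"
      if PySem.Str.slice f (some (ind_slash + 1)) (some ind_dash) = user_id then
        let ind_dash2 := PySem.Str.rfind f "-"
        let ind_dot := PySem.Str.rfind f "."
        (acc.1 ++ [f], acc.2 ++ [PySem.Str.slice f (some (ind_dash2 + 1)) (some ind_dot)])
      else acc) (ufs, sids)
    = (ufs ++ files.filter (fun f => pvUserKey f == user_id),
       sids ++ (files.filter (fun f => pvUserKey f == user_id)).map pvSigId) := by
  induction files generalizing ufs sids with
  | nil => simp
  | cons f rest ih =>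
    simp only [List.foldl_cons, List.filter_cons]
    by_cases h : pvUserKey f = user_id
    · have h' : PySem.Str.slice f (some (PySem.Str.rfind f "/" + 1))
          (some (PySem.Str.find f "-")) = user_id := by simpa [pvUserKey] using h
      have hb : (pvUserKey f == user_id) = true := by simp [h]
      simp only [hb, if_pos h', ih, if_true]
      simp [pvSigId]
    · have h' : ¬ PySem.Str.slice f (some (PySem.Str.rfind f "/" + 1))
          (some (PySem.Str.find f "-")) = user_id := by simpa [pvUserKey] using h
      have hb : (pvUserKey f == user_id) = false := by simp [h]
      simp only [hb, if_neg h', ih]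
      simp

theorem group_getD_eq (user_id : String) (files : List String) :
    (files.foldl (fun d f => d.modify (pvUserKey f) [] (· ++ [f]))
        (PySem.Dict.empty : PySem.Dict String (List String))).getD user_id []
    = files.filter (fun f => pvUserKey f == user_id) := by
  have h1 : files.foldl (fun d f => d.modify (pvUserKey f) [] (· ++ [f]))
        (PySem.Dict.empty : PySem.Dict String (List String))
      = (files.map (fun f => (pvUserKey f, f))).foldl
          (fun d p => d.modify p.1 [] (· ++ [p.2])) PySem.Dict.empty := by
    rw [List.foldl_map]
  rw [h1, PySem.Dict.getD_foldl_modify_append]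
  simp [List.filter_map, Function.comp_def]

-- ===== VERDICT =====
theorem getFiles_byUser_spec : Claim_equal_getFiles_byUser := by
  intro user_id files _
  unfold Spec_getFiles_byUser getFiles_byUser getFiles_byUser_alt
  have hf := getFiles_foldl_eq user_id files [] []
  simp only [List.nil_append] at hf
  simp only [hf, group_getD_eq]
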